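-- pv_equiv track=rewrite | github.com/kushalkhanal/DSA-assignment | HikingTrail.py | longest_hike
-- ===== SOURCE A (Python) =====
-- def longest_hike(nums, k):
--     max_len = 0
--     i = 1
--     while i < len(nums):
--         if nums[i] > nums[i - 1]:
--             length = 1
--             while i + length < len(nums) and nums[i + length] - nums[i + length - 1] <= k:
--                 length += 1
--             max_len = max(max_len, length)
--         i += 1
--     return max_len
-- ===== SOURCE B (Python) =====
-- def longest_hike(nums, k):
--     # One backward pass: r is the run-length (consecutive diffs <= k) starting at i,
--     # maintained incrementally instead of rescanning for every start index.
--     best = 0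
--     r = 1
--     for i in range(len(nums) - 1, 0, -1):
--         if nums[i] > nums[i - 1]:
--             best = max(best, r)
--         r = r + 1 if nums[i] - nums[i - 1] <= k else 1
--     return best
-- ===== Notes on version B (the rewrite author's own statement) =====
-- stated objective: faster
-- what changed: Replaces A's rescan of the whole run for every increasing start index with a single backward pass that maintains the current run-length incrementally.
import Mathlib
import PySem

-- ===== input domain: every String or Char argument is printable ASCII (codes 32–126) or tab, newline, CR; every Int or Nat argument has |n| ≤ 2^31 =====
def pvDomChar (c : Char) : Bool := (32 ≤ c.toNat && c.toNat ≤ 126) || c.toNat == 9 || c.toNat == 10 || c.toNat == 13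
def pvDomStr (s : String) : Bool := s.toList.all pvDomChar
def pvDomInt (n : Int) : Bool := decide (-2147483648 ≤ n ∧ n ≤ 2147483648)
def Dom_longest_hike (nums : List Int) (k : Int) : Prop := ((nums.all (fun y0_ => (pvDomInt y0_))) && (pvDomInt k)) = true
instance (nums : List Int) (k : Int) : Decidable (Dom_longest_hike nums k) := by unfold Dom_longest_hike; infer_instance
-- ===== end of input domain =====

-- B replaces A's per-start rescan of the run by one backward pass maintaining the run-length; equivalence of return values is proved below.

-- ===== PORT A =====
-- inner while loop: while i + length < len(nums) and nums[i+length] - nums[i+length-1] <= k: length += 1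
-- (p stands for i + length; all indices are in range, so getD is exact Python indexing)
def innerA (nums : List Int) (k : Int) (p : Nat) (len : Int) : Int :=
  if h : p < nums.length ∧ nums.getD p 0 - nums.getD (p - 1) 0 ≤ k then
    innerA nums k (p + 1) (len + 1)
  else len
termination_by nums.length - p
decreasing_by omega

-- outer while loop over i
def outerA (nums : List Int) (k : Int) (i : Nat) (max_len : Int) : Int :=
  if h : i < nums.length then
    outerA nums k (i + 1)
      (if nums.getD (i - 1) 0 < nums.getD i 0 then max max_len (innerA nums k (i + 1) 1) else max_len)
  else max_len
termination_by nums.length - i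
decreasing_by omega

def longest_hike (nums : List Int) (k : Int) : Int := outerA nums k 1 0

-- ===== PORT B =====
-- backward for-loop of Source B: i runs len(nums)-1, …, 1; best/r are the loop accumulators
def altLoop (nums : List Int) (k : Int) (i : Nat) (best r : Int) : Int :=
  match i with
  | 0 => best
  | Nat.succ j =>
    altLoop nums k j
      (if nums.getD j 0 < nums.getD (j + 1) 0 then max best r else best)
      (if nums.getD (j + 1) 0 - nums.getD j 0 ≤ k then r + 1 else 1)

def longest_hike_alt (nums : List Int) (k : Int) : Int :=
  altLoop nums k (nums.length - 1) 0 1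

-- ===== PRECONDITION & SPEC =====
def Spec_longest_hike (nums : List Int) (k : Int) (out : Int) : Prop := out = longest_hike_alt nums k
instance (nums : List Int) (k : Int) (out : Int) : Decidable (Spec_longest_hike nums k out) := by unfold Spec_longest_hike; infer_instance

-- ===== CLAIM (what is proved, stated in full; the proofs are below) =====
def Claim_equal_longest_hike : Prop := ∀ (nums : List Int) (k : Int), Dom_longest_hike nums k → Spec_longest_hike nums k (longest_hike nums k)

-- ===== LEMMAS AND PROOFS =====

-- number of consecutive steps with diff ≤ k starting at position p
def cnt (nums : List Int) (k : Int) (p : Nat) : Int :=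
  if h : p < nums.length ∧ nums.getD p 0 - nums.getD (p - 1) 0 ≤ k then
    1 + cnt nums k (p + 1)
  else 0
termination_by nums.length - p
decreasing_by omega

-- run length starting at index i
def runL (nums : List Int) (k : Int) (i : Nat) : Int := 1 + cnt nums k (i + 1)

-- contribution of index j to the max
def gC (nums : List Int) (k : Int) (j : Nat) : Int :=
  if nums.getD (j - 1) 0 < nums.getD j 0 then runL nums k j else 0

lemma innerA_eq (nums : List Int) (k : Int) :
    ∀ f p len, nums.length - p ≤ f → innerA nums k p len = len + cnt nums k p := by
  intro f
  induction f with
  | zero =>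
    intro p len h
    rw [innerA, cnt]
    split
    · omega
    · ring
  | succ f ih =>
    intro p len h
    rw [innerA, cnt]
    split
    · next hc =>
      rw [ih (p + 1) (len + 1) (by omega)]
      ring
    · ring

lemma runL_step (nums : List Int) (k : Int) (j : Nat) (hj : j + 1 < nums.length) :
    (if nums.getD (j + 1) 0 - nums.getD j 0 ≤ k then runL nums k (j + 1) + 1 else 1)
      = runL nums k j := by
  unfold runL
  conv_rhs => rw [cnt]
  by_cases hd : nums.getD (j + 1) 0 - nums.getD j 0 ≤ k
  · rw [if_pos hd, dif_pos ⟨hj, by simpa using hd⟩]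
    ring
  · rw [if_neg hd, dif_neg (fun h => hd (by simpa using h.2))]
    norm_num

lemma foldl_max_shift (g : Nat → Int) :
    ∀ (l : List Nat) (b x : Int),
      List.foldl (fun a j => max a (g j)) (max b x) l
        = max (List.foldl (fun a j => max a (g j)) b l) x := by
  intro l
  induction l with
  | nil => intro b x; rfl
  | cons h t ih =>
    intro b x
    simp only [List.foldl_cons]
    rw [max_right_comm b x (g h), ih]

lemma foldl_max_reverse (g : Nat → Int) :
    ∀ (l : List Nat) (b : Int),
      List.foldl (fun a j => max a (g j)) b l.reverse
        = List.foldl (fun a j => max a (g j)) b l := by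
  intro l
  induction l with
  | nil => intro b; rfl
  | cons h t ih =>
    intro b
    simp only [List.reverse_cons, List.foldl_append, List.foldl_cons, List.foldl_nil,
      List.foldl_cons]
    rw [ih, foldl_max_shift]

lemma outerA_fold (nums : List Int) (k : Int) :
    ∀ f i b, nums.length - i ≤ f → 0 ≤ b →
      outerA nums k i b
        = List.foldl (fun a j => max a (gC nums k j)) b (List.range' i (nums.length - i)) := by
  intro f
  induction f with
  | zero =>
    intro i b h hb
    rw [outerA]
    rw [dif_neg (by omega)]
    have : nums.length - i = 0 := by omega
    rw [this]
    rfl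
  | succ f ih =>
    intro i b h hb
    rw [outerA]
    by_cases hi : i < nums.length
    · rw [dif_pos hi]
      have hr : nums.length - i = (nums.length - (i + 1)) + 1 := by omega
      rw [hr, List.range'_succ, List.foldl_cons]
      have hb' : 0 ≤ (if nums.getD (i - 1) 0 < nums.getD i 0 then max b (innerA nums k (i + 1) 1) else b) := by
        split
        · exact le_trans hb (le_max_left _ _)
        · exact hb
      rw [ih (i + 1) _ (by omega) hb']
      congr 1
      unfold gC
      by_cases hc : nums.getD (i - 1) 0 < nums.getD i 0
      · rw [if_pos hc, if_pos hc]
        unfold runL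
        rw [innerA_eq nums k (nums.length - (i + 1)) (i + 1) 1 (by omega)]
      · rw [if_neg hc, if_neg hc]
        omega
    · rw [dif_neg hi]
      have : nums.length - i = 0 := by omega
      rw [this]
      rfl

lemma altLoop_fold (nums : List Int) (k : Int) :
    ∀ i b, i < nums.length → 0 ≤ b →
      altLoop nums k i b (runL nums k i)
        = List.foldl (fun a j => max a (gC nums k j)) b (List.range' 1 i).reverse := by
  intro i
  induction i with
  | zero => intro b _ _; rfl
  | succ j ih =>
    intro b hj hb
    rw [altLoop]
    rw [runL_step nums k j hj]
    have hrng : (List.range' 1 (j + 1)).reverse = (j + 1) :: (List.range' 1 j).reverse := by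
      simp [List.range'_1_concat, Nat.add_comm]
    rw [hrng, List.foldl_cons]
    have hgc : (if nums.getD j 0 < nums.getD (j + 1) 0 then max b (runL nums k (j + 1)) else b)
        = max b (gC nums k (j + 1)) := by
      unfold gC
      simp only [Nat.add_sub_cancel]
      by_cases hc : nums.getD j 0 < nums.getD (j + 1) 0
      · rw [if_pos hc, if_pos hc]
      · rw [if_neg hc, if_neg hc]
        exact (max_eq_left hb).symm
    rw [hgc]
    exact ih _ (by omega) (le_trans hb (le_max_left _ _))

-- ===== VERDICT (by name: the statement is the Claim_ definition above) =====
theorem longest_hike_spec : Claim_equal_longest_hike := by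
  intro nums k _
  unfold Spec_longest_hike longest_hike longest_hike_alt
  by_cases h0 : nums.length = 0
  · rw [h0]
    rw [outerA, dif_neg (by omega)]
    rfl
  · have h1 : runL nums k (nums.length - 1) = 1 := by
      unfold runL
      rw [cnt, dif_neg (by omega)]
      norm_num
    rw [outerA_fold nums k nums.length 1 0 (by omega) (by omega), ← h1,
      altLoop_fold nums k (nums.length - 1) 0 (by omega) (by omega),
      foldl_max_reverse]
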